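-- pv_equiv track=rewrite | github.com/pypi-data/pypi-mirror-348 | packages/pybigue/pybigue-1.0.0.tar.gz/pybigue-1.0.0/pybigue/kernels/clusters.py | find_end_periodic
-- ===== SOURCE A (Python) =====
-- def find_end_periodic(sequence, subseq):
--     """Works if subseq has contiguous positions in sequence."""
--     end = len(sequence)
--     last_value_in_subseq = sequence[-1] in subseq
--     for i, value in enumerate(sequence):
--         if last_value_in_subseq and not value in subseq:
--             end = i - 1
--             break
--         last_value_in_subseq = value in subseq
--     return end
-- ===== SOURCE B (Python) =====
-- def find_end_periodic(sequence, subseq):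
--     """Works if subseq has contiguous positions in sequence."""
--     sub = frozenset(subseq)
--     n = len(sequence)
--     if sequence[-1] in sub and sequence[0] not in sub:
--         return -1
--     rest = sequence
--     while rest and rest[0] not in sub:
--         rest = rest[1:]
--     tail = rest
--     while tail and tail[0] in sub:
--         tail = tail[1:]
--     if not tail:
--         return n
--     return n - len(tail) - 1
-- ===== Notes on version B (the rewrite author's own statement) =====
-- stated objective: alternative
-- what changed: Replaces A's single stateful transition scan (carrying a last-membership flag through enumerate with a break) by a case split: the periodic wrap (last element member, first not) is checked once up front returning -1, then the leading non-member prefix and the following member run are dropped by two suffix-trimming loops and the answer is computed arithmetically from the length of the remaining suffix.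
import Mathlib
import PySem

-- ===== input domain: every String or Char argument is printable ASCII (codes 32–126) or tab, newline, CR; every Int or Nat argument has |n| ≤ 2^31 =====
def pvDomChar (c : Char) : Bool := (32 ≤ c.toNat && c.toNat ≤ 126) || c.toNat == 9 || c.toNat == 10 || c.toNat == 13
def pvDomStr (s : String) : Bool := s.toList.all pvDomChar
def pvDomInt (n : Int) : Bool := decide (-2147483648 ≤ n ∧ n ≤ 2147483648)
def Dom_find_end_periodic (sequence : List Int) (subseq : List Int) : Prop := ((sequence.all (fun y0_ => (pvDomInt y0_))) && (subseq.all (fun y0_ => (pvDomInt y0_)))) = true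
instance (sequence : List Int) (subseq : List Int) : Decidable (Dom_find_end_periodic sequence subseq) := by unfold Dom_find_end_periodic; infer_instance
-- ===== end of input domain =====

-- B replaces A's stateful transition scan by an upfront periodic-wrap check, two suffix-trimming loops (drop leading non-members, then the member run), and suffix-length arithmetic (alternative decomposition); both raise IndexError on the empty sequence (excluded by Pre_).


-- ===== PORT A =====
-- A's for-loop with break: recursion over enumerate(sequence), carrying last_value_in_subseq.
def goA (subseq : List Int) : List (Int × Int) → Bool → Int → Int
  | [], _, e => e
  | (i, v) :: rest, last, e =>
    if last && !(subseq.contains v) then i - 1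
    else goA subseq rest (subseq.contains v) e

def find_end_periodic (sequence : List Int) (subseq : List Int) : Int :=
  match PySem.List.pyGet? sequence (-1) with
  | none => 0  -- sequence[-1] raises IndexError on empty input; excluded by Pre_
  | some lastv =>
      goA subseq (PySem.List.enumerate sequence 0) (subseq.contains lastv)
        (sequence.length : Int)

-- ===== PORT B =====
-- while rest and rest[0] not in sub: rest = rest[1:]
def dropNonMemB (sub : PySem.Set Int) : List Int → List Int
  | [] => []
  | v :: rest => if !(PySem.Set.contains sub v) then dropNonMemB sub rest else v :: rest

-- while tail and tail[0] in sub: tail = tail[1:]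
def dropMemB (sub : PySem.Set Int) : List Int → List Int
  | [] => []
  | v :: rest => if PySem.Set.contains sub v then dropMemB sub rest else v :: rest

def find_end_periodic_alt (sequence : List Int) (subseq : List Int) : Int :=
  let sub := PySem.Set.ofList subseq
  let n : Int := sequence.length
  match PySem.List.pyGet? sequence (-1), PySem.List.pyGet? sequence 0 with
  | some lastv, some firstv =>
      if PySem.Set.contains sub lastv && !(PySem.Set.contains sub firstv) then -1
      else
        let rest := dropNonMemB sub sequence
        let tail := dropMemB sub rest
        if tail = [] then n else n - (tail.length : Int) - 1
  | _, _ => 0  -- sequence[-1] raises IndexError on empty input; excluded by Pre_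

-- ===== PRECONDITION & SPEC =====
-- Pre_ excludes only the empty sequence, on which both A and B raise IndexError (sequence[-1]).
def Pre_find_end_periodic (sequence : List Int) (subseq : List Int) : Prop := sequence ≠ []
instance (sequence : List Int) (subseq : List Int) : Decidable (Pre_find_end_periodic sequence subseq) := by unfold Pre_find_end_periodic; infer_instance
def pvWitness_find_end_periodic : List Int × List Int := ([1, 2, 5], [2, 5])

def Spec_find_end_periodic (sequence : List Int) (subseq : List Int) (out : Int) : Prop := out = find_end_periodic_alt sequence subseq
instance (sequence : List Int) (subseq : List Int) (out : Int) : Decidable (Spec_find_end_periodic sequence subseq out) := by unfold Spec_find_end_periodic; infer_instance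

-- ===== CLAIM (what is proved, stated in full; the proofs are below) =====
def Claim_equal_find_end_periodic : Prop := ∀ (sequence : List Int) (subseq : List Int), Dom_find_end_periodic sequence subseq → Pre_find_end_periodic sequence subseq → Spec_find_end_periodic sequence subseq (find_end_periodic sequence subseq)

-- ===== LEMMAS AND PROOFS =====

-- set(subseq) membership agrees with list membership
theorem set_contains_eq (subseq : List Int) (v : Int) :
    PySem.Set.contains (PySem.Set.ofList subseq) v = subseq.contains v := by
  have h := PySem.Set.mem_ofList (xs := subseq) (y := v)
  simp only [PySem.Set.contains, List.contains_eq_mem]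
  exact decide_eq_decide.mpr h

-- A's scan with the flag UP: skip the member run, then break at its end (or fall through to e).
theorem goA_true_eq (subseq : List Int) (l : List Int) (k e : Int) :
    goA subseq (PySem.List.enumerate l k) true e =
      (if dropMemB (PySem.Set.ofList subseq) l = [] then e
       else k + ((l.length : Int) - ((dropMemB (PySem.Set.ofList subseq) l).length : Int)) - 1) := by
  induction l generalizing k with
  | nil => simp [PySem.List.enumerate_nil, goA, dropMemB]
  | cons v rest ih =>
      rw [PySem.List.enumerate_cons]
      by_cases hv : v ∈ subseq
      · have hd : dropMemB (PySem.Set.ofList subseq) (v :: rest) = dropMemB (PySem.Set.ofList subseq) rest := by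
          rw [dropMemB, if_pos (by simp [set_contains_eq, List.contains_eq_mem, hv])]
        simp only [goA, List.contains_eq_mem, hv, decide_true, Bool.not_true, Bool.and_false,
          Bool.false_eq_true, if_false, if_true, hd]
        rw [ih (k + 1)]
        by_cases ht : dropMemB (PySem.Set.ofList subseq) rest = []
        · simp [ht]
        · rw [if_neg ht, if_neg ht]
          simp only [List.length_cons]
          push_cast
          ring
      · have hd : dropMemB (PySem.Set.ofList subseq) (v :: rest) = v :: rest := by
          rw [dropMemB, if_neg (by simp [set_contains_eq, List.contains_eq_mem, hv])]
        simp only [goA, List.contains_eq_mem, hv, decide_false, Bool.not_false, Bool.true_and,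
          if_true, hd]
        rw [if_neg (by simp)]
        ring

-- A's scan with the flag DOWN: skip the non-member prefix, then continue with the flag up.
theorem goA_false_eq (subseq : List Int) (l : List Int) (k e : Int) :
    goA subseq (PySem.List.enumerate l k) false e =
      (if dropNonMemB (PySem.Set.ofList subseq) l = [] then e
       else goA subseq
         (PySem.List.enumerate (dropNonMemB (PySem.Set.ofList subseq) l).tail
           (k + ((l.length : Int) - (((dropNonMemB (PySem.Set.ofList subseq) l).length : Int) - 1))))
         true e) := by
  induction l generalizing k with
  | nil => simp [PySem.List.enumerate_nil, goA, dropNonMemB]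
  | cons v rest ih =>
      rw [PySem.List.enumerate_cons]
      by_cases hv : v ∈ subseq
      · have hd : dropNonMemB (PySem.Set.ofList subseq) (v :: rest) = v :: rest := by
          rw [dropNonMemB, if_neg (by simp [set_contains_eq, List.contains_eq_mem, hv])]
        simp only [goA, List.contains_eq_mem, hv, decide_true, Bool.false_and,
          Bool.false_eq_true, if_false, hd]
        rw [if_neg (by simp)]
        simp only [List.tail_cons, List.length_cons]
        congr 2
        push_cast
        ring
      · have hd : dropNonMemB (PySem.Set.ofList subseq) (v :: rest) = dropNonMemB (PySem.Set.ofList subseq) rest := by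
          rw [dropNonMemB, if_pos (by simp [set_contains_eq, List.contains_eq_mem, hv])]
        simp only [goA, List.contains_eq_mem, hv, decide_false, Bool.false_and,
          Bool.false_eq_true, if_false, hd]
        rw [ih (k + 1)]
        by_cases hr : dropNonMemB (PySem.Set.ofList subseq) rest = []
        · simp [hr]
        · rw [if_neg hr, if_neg hr]
          congr 2
          simp only [List.length_cons]
          push_cast
          ring

-- the head of dropNonMemB's result is a member
theorem dropNonMemB_head_mem (sub : PySem.Set Int) (l : List Int) (w : Int) (ws : List Int)
    (hr : dropNonMemB sub l = w :: ws) : PySem.Set.contains sub w = true := by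
  induction l with
  | nil => simp [dropNonMemB] at hr
  | cons a as iha =>
      simp only [dropNonMemB] at hr
      cases ha : PySem.Set.contains sub a
      · simp only [ha, Bool.not_false, if_true] at hr
        exact iha hr
      · simp only [ha, Bool.not_true, Bool.false_eq_true, if_false] at hr
        cases hr
        exact ha

-- dropMemB over a member head skips it.
theorem dropMemB_cons_mem (sub : PySem.Set Int) (v : Int) (rest : List Int)
    (h : PySem.Set.contains sub v = true) :
    dropMemB sub (v :: rest) = dropMemB sub rest := by
  rw [dropMemB, if_pos h]

-- ===== VERDICT (by name: the statement is the Claim_ definition above) =====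
theorem find_end_periodic_spec : Claim_equal_find_end_periodic := by
  intro sequence subseq _ hpre
  show find_end_periodic sequence subseq = find_end_periodic_alt sequence subseq
  obtain ⟨v, rest, rfl⟩ : ∃ v rest, sequence = v :: rest := by
    cases sequence with
    | nil => exact absurd rfl hpre
    | cons v rest => exact ⟨v, rest, rfl⟩
  obtain ⟨x, hx⟩ : ∃ x, PySem.List.pyGet? (v :: rest) (-1) = some x := by
    rw [PySem.List.pyGet?_neg_one]
    cases hL : (v :: rest).getLast? with
    | none => simp at hL
    | some y => exact ⟨y, rfl⟩
  have h0 : PySem.List.pyGet? (v :: rest) (0 : Int) = some v := by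
    have : PySem.List.pyGet? (v :: rest) ((0 : Nat) : Int) = (v :: rest)[(0 : Nat)]? := by
      exact PySem.List.pyGet?_natCast (v :: rest) 0
    simpa using this
  simp only [find_end_periodic, find_end_periodic_alt, hx, h0, set_contains_eq]
  by_cases hlast : x ∈ subseq
  · -- flag starts up
    by_cases hv : v ∈ subseq
    · -- first element member: B's first drop is a no-op
      simp only [List.contains_eq_mem, hlast, hv, decide_true, Bool.not_true, Bool.and_false,
        Bool.false_eq_true, if_false]
      rw [goA_true_eq]
      have hr : dropNonMemB (PySem.Set.ofList subseq) (v :: rest) = v :: rest := by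
        rw [dropNonMemB, if_neg (by simp [set_contains_eq, List.contains_eq_mem, hv])]
      rw [hr]
      by_cases ht : dropMemB (PySem.Set.ofList subseq) (v :: rest) = []
      · simp [ht]
      · rw [if_neg ht, if_neg ht]
        ring
    · -- wrap: A breaks at i=0, B returns -1
      simp [goA, PySem.List.enumerate_cons, hlast, hv]
  · -- flag starts down; wrap branch of B is off
    simp only [List.contains_eq_mem, hlast, decide_false, Bool.false_and, Bool.false_eq_true,
      if_false]
    rw [goA_false_eq]
    cases hr : dropNonMemB (PySem.Set.ofList subseq) (v :: rest) with
    | nil => simp [dropMemB]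
    | cons w ws =>
        have hw : PySem.Set.contains (PySem.Set.ofList subseq) w = true :=
          dropNonMemB_head_mem _ _ _ _ hr
        rw [if_neg (by simp), goA_true_eq, dropMemB_cons_mem _ _ _ hw]
        simp only [List.tail_cons, List.length_cons]
        by_cases ht : dropMemB (PySem.Set.ofList subseq) ws = []
        · simp [ht]
        · rw [if_neg ht, if_neg ht]
          push_cast
          ring
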